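-- pv_equiv track=rewrite | github.com/wlu03/structure_descent | src/baselines/_llm_ranker_common.py | letter_permutations
-- ===== SOURCE A (Python) =====
-- from typing import Any, Dict, List, Mapping, Optional, Sequence
--
-- def letter_permutations(
--     n_alts: int, K: int, seed: int = 0
-- ) -> List[tuple[int, ...]]:
--     """Return the K-permutation schedule mapping letter slots → alt indices.
--
--     For the canonical J=4, K=4 configuration this is the left-rotation
--     Latin square prescribed in ``zero_shot_claude_ranker.md`` §4::
--
--         k=0: (0, 1, 2, 3)   identity
--         k=1: (1, 2, 3, 0)   left-rotate by 1
--         k=2: (2, 3, 0, 1)   left-rotate by 2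
--         k=3: (3, 0, 1, 2)   left-rotate by 3
--
--     Each returned tuple ``pi`` has length ``n_alts``: ``pi[s]`` is the
--     canonical alternative index displayed in letter-slot ``s`` (so slot 0
--     → letter A). A Latin-square rotation guarantees every alternative
--     appears in every letter-slot exactly once across the K calls, which
--     is the minimum condition for first-order positional-bias cancellation
--     (Pezeshkpour & Hruschka 2024).
--
--     Parameters
--     ----------
--     n_alts
--         Number of alternatives per event (PO-LEU uses 4).
--     K
--         Number of permutations. For ``K <= n_alts`` we return the first K
--         rows of the left-rotation Latin square; this hits the minimum-bias
--         criterion when ``K == n_alts``. For ``K > n_alts`` we wrap around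
--         (still deterministic in ``seed``) — callers asking for more than
--         n_alts permutations are typically doing higher-order debiasing
--         experiments.
--     seed
--         Reserved for future random shuffles over which rotation to start
--         from. Currently unused because the rotation order is fully
--         specified by the Latin square; exposed so subclasses that want a
--         non-canonical starting rotation can override.
--
--     Returns
--     -------
--     list of tuple[int, ...]
--         Length K, each tuple of length ``n_alts``.
--     """
--     if n_alts <= 0:
--         raise ValueError(f"n_alts must be positive, got {n_alts}")
--     if K <= 0:
--         raise ValueError(f"K must be positive, got {K}")
--     del seed  # currently unused — see docstring
--     base = list(range(n_alts))
--     perms: List[tuple[int, ...]] = []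
--     for k in range(K):
--         shift = k % n_alts
--         rotated = tuple(base[shift:] + base[:shift])
--         perms.append(rotated)
--     return perms
-- ===== SOURCE B (Python) =====
-- from typing import List
--
--
-- def letter_permutations(
--     n_alts: int, K: int, seed: int = 0
-- ) -> List[tuple[int, ...]]:
--     """Same schedule, built incrementally: keep ONE current row as mutable
--     state and derive each next row from the previous one by popping its head
--     and appending it to the end (a rotate-by-one step). No per-row shift
--     computation, no modular arithmetic, no slicing from a fixed base; the
--     wrap-around for K > n_alts falls out automatically since n rotate-by-one
--     steps return the row to the identity."""
--     if n_alts <= 0: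
--         raise ValueError(f"n_alts must be positive, got {n_alts}")
--     if K <= 0:
--         raise ValueError(f"K must be positive, got {K}")
--     row = list(range(n_alts))
--     perms: List[tuple[int, ...]] = []
--     for _ in range(K):
--         perms.append(tuple(row))
--         row.append(row.pop(0))
--     return perms
-- ===== Notes on version B (the rewrite author's own statement) =====
-- stated objective: alternative
-- what changed: B builds the schedule incrementally: it carries a single current row as mutable state and obtains each next row from the previous one by popping the head and appending it (one rotate-by-one step per iteration), instead of recomputing every row independently from a fixed base list via shift = k % n_alts and slice concatenation; no modular arithmetic or per-row slicing remains and the K > n_alts wrap-around is automatic.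
import Mathlib
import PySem

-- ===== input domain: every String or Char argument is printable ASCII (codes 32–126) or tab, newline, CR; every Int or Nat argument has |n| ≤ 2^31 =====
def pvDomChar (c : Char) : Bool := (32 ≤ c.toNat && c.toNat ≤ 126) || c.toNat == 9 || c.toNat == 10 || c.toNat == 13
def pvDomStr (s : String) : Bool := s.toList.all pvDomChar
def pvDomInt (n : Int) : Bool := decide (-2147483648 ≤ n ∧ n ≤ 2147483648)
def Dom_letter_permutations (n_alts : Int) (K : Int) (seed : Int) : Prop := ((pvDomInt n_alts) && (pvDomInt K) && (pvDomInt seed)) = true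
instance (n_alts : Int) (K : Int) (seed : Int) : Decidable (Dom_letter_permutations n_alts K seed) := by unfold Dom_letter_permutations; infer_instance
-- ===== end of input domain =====

-- B builds the schedule incrementally — each row is the previous row with its head popped and appended (rotate-by-one state) — instead of re-slicing a fixed base with shift = k % n_alts (alternative decomposition, same cost).

-- ===== PORT A =====
-- A builds base = list(range(n_alts)) and, for each k, appends base[shift:] + base[:shift] with shift = k % n_alts.
def letter_permutations (n_alts : Int) (K : Int) (seed : Int) : List (List Int) :=
  if n_alts ≤ 0 then [] -- Python raises ValueError here; excluded by Pre_
  else if K ≤ 0 then [] -- Python raises ValueError here; excluded by Pre_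
  else
    let base := PySem.List.pyRange 0 n_alts 1
    (PySem.List.pyRange 0 K 1).foldl
      (fun perms k =>
        let shift := PySem.Int.mod k n_alts
        perms ++ [PySem.List.slice base (some shift) none ++ PySem.List.slice base none (some shift)])
      []

-- ===== PORT B =====
-- B: state (perms, row); each iteration appends tuple(row) then does row.append(row.pop(0)).
def letter_permutations_alt (n_alts : Int) (K : Int) (seed : Int) : List (List Int) :=
  if n_alts ≤ 0 then [] -- Python raises ValueError here; excluded by Pre_
  else if K ≤ 0 then [] -- Python raises ValueError here; excluded by Pre_
  else
    ((PySem.List.pyRange 0 K 1).foldl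
      (fun (st : List (List Int) × List Int) _ =>
        (st.1 ++ [st.2],
         -- row.append(row.pop(0)); row is nonempty here since n_alts > 0
         match PySem.List.pop? st.2 0 with
         | some (x, rest) => rest ++ [x]
         | none => st.2))
      ([], PySem.List.pyRange 0 n_alts 1)).1

-- ===== PRECONDITION & SPEC =====
-- Pre_ excludes exactly the inputs where A raises ValueError (n_alts <= 0 or K <= 0).
def Pre_letter_permutations (n_alts : Int) (K : Int) (seed : Int) : Prop := 0 < n_alts ∧ 0 < K
instance (n_alts : Int) (K : Int) (seed : Int) : Decidable (Pre_letter_permutations n_alts K seed) := by unfold Pre_letter_permutations; infer_instance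
def pvWitness_letter_permutations : Int × Int × Int := (4, 4, 0)

def Spec_letter_permutations (n_alts : Int) (K : Int) (seed : Int) (out : List (List Int)) : Prop := out = letter_permutations_alt n_alts K seed
instance (n_alts : Int) (K : Int) (seed : Int) (out : List (List Int)) : Decidable (Spec_letter_permutations n_alts K seed out) := by unfold Spec_letter_permutations; infer_instance

-- ===== CLAIM (what is proved, stated in full; the proofs are below) =====
def Claim_equal_letter_permutations : Prop := ∀ (n_alts : Int) (K : Int) (seed : Int), Dom_letter_permutations n_alts K seed → Pre_letter_permutations n_alts K seed → Spec_letter_permutations n_alts K seed (letter_permutations n_alts K seed)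

-- ===== LEMMAS AND PROOFS =====

-- the k-th schedule row: slot s shows alternative (s + k) % N
def pvRow (N k : ℕ) : List Int := (List.range N).map (fun s => (((s + k) % N : ℕ) : Int))

-- rotation of range N by t = j % N equals the modular-shift map
theorem pv_rot_range (N j : ℕ) (hN : 0 < N) :
    (List.range N).drop (j % N) ++ (List.range N).take (j % N)
      = (List.range N).map (fun s => (s + j) % N) := by
  set t := j % N with ht
  have htN : t < N := Nat.mod_lt _ hN
  apply List.ext_getElem
  · simp only [List.length_append, List.length_drop, List.length_take, List.length_map,
      List.length_range]
    omega
  · intro i h1 h2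
    have hi : i < N := by simpa using h2
    have hmod : (i + j) % N = (i + t) % N := by
      simp [ht, Nat.add_mod]
    rw [List.getElem_append]
    split
    · rename_i hlt
      have : t + i < N := by simp at hlt; omega
      simp [hmod, Nat.mod_eq_of_lt (by omega : i + t < N)]
      omega
    · rename_i hge
      have hlen : ((List.range N).drop t).length = N - t := by simp
      have hge' : N - t ≤ i := by omega
      have h3 : i - (N - t) < t := by omega
      simp only [hlen]
      rw [List.getElem_take, List.getElem_range]
      simp only [List.getElem_map, List.getElem_range]
      rw [hmod, Nat.mod_eq_sub_mod (by omega : N ≤ i + t),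
        Nat.mod_eq_of_lt (by omega : i + t - N < N)]
      omega

theorem pv_pyRange_zero_cast (n : Int) (_hn : 0 ≤ n) :
    PySem.List.pyRange 0 n 1 = (List.range n.toNat).map (fun s : ℕ => (s : Int)) := by
  rw [PySem.List.pyRange_one]
  simp

-- the initial row is pvRow N 0
theorem pv_row_zero (N : ℕ) :
    (List.range N).map (fun s : ℕ => (s : Int)) = pvRow N 0 := by
  unfold pvRow
  apply List.map_congr_left
  intro s hs
  rw [List.mem_range] at hs
  simp [Nat.mod_eq_of_lt hs]

-- per-row equality: A's sliced rotation of the base row equals pvRow N j, for k = (j : Int)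
theorem pv_row_eq (N j : ℕ) (hN : 0 < N) :
    PySem.List.slice (pvRow N 0)
        (some (PySem.Int.mod (j : Int) (N : Int))) none
      ++ PySem.List.slice (pvRow N 0)
        none (some (PySem.Int.mod (j : Int) (N : Int)))
      = pvRow N j := by
  rw [← pv_row_zero]
  rw [PySem.Int.mod_natCast, PySem.List.slice_from_natCast, PySem.List.slice_to_natCast]
  unfold pvRow
  simp only [← List.map_drop, ← List.map_take, ← List.map_append]
  rw [pv_rot_range N j hN]
  simp [List.map_map]

-- one rotate-by-one step advances pvRow's shift by one
theorem pv_rotate_step (N k : ℕ) (hN : 0 < N) :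
    (match PySem.List.pop? (pvRow N k) 0 with
     | some (x, rest) => rest ++ [x]
     | none => pvRow N k) = pvRow N (k + 1) := by
  obtain ⟨m, rfl⟩ : ∃ m, N = m + 1 := ⟨N - 1, by omega⟩
  unfold pvRow
  conv_lhs => rw [List.range_succ_eq_map]
  conv_rhs => rw [List.range_succ]
  simp only [List.map_cons, PySem.List.pop?_zero_cons, List.map_append, List.map_map,
    List.map_nil]
  congr 1
  · apply List.map_congr_left
    intro s _
    simp only [Function.comp, Nat.succ_eq_add_one]
    congr 2
    omega
  · have h : (m + (k + 1)) % (m + 1) = (0 + k) % (m + 1) := by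
      have h2 : m + (k + 1) = k + (m + 1) := by omega
      rw [h2, Nat.add_mod_right]
      simp
    simp [h]

-- loop invariant: folding B's step over any list, starting from row pvRow N k,
-- appends the rows pvRow N k, pvRow N (k+1), …
theorem pv_loop (N : ℕ) (hN : 0 < N) (l : List Int) (acc : List (List Int)) (k : ℕ) :
    ((l.foldl
      (fun (st : List (List Int) × List Int) _ =>
        (st.1 ++ [st.2],
         match PySem.List.pop? st.2 0 with
         | some (x, rest) => rest ++ [x]
         | none => st.2))
      (acc, pvRow N k)).1)
      = acc ++ (List.range l.length).map (fun i => pvRow N (k + i)) := by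
  induction l generalizing acc k with
  | nil => simp
  | cons x xs ih =>
    simp only [List.foldl_cons, pv_rotate_step N k hN, ih, List.length_cons,
      List.range_succ_eq_map, List.map_cons, List.map_map]
    simp only [Nat.add_zero, List.append_assoc, List.singleton_append]
    congr 2
    apply List.map_congr_left
    intro i _
    simp only [Function.comp, Nat.succ_eq_add_one]
    congr 1
    omega

-- ===== VERDICT (by name: the statement is the Claim_ definition above) =====
theorem letter_permutations_spec : Claim_equal_letter_permutations := by
  intro n_alts K seed _ hpre
  obtain ⟨hn, hK⟩ := hpre
  have hN : 0 < n_alts.toNat := by omega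
  unfold Spec_letter_permutations letter_permutations letter_permutations_alt
  rw [if_neg (by omega), if_neg (by omega), if_neg (by omega), if_neg (by omega)]
  -- A side: fold-append is map, then each row is pvRow
  rw [pv_pyRange_zero_cast K (le_of_lt hK), pv_pyRange_zero_cast n_alts (le_of_lt hn)]
  rw [PySem.List.foldl_append_singleton_eq_map
    (fun k => PySem.List.slice ((List.range n_alts.toNat).map (fun s : ℕ => (s : Int)))
        (some (PySem.Int.mod k n_alts)) none
      ++ PySem.List.slice ((List.range n_alts.toNat).map (fun s : ℕ => (s : Int)))
        none (some (PySem.Int.mod k n_alts)))]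
  -- B side: the loop invariant from the initial row pvRow N 0
  rw [pv_row_zero n_alts.toNat]
  rw [pv_loop n_alts.toNat hN _ [] 0]
  simp only [List.nil_append, List.map_map, List.length_map, List.length_range]
  have hcast : n_alts = ((n_alts.toNat : ℕ) : Int) := (Int.toNat_of_nonneg (le_of_lt hn)).symm
  apply List.map_congr_left
  intro j _
  simp only [Function.comp, Nat.zero_add]
  rw [hcast]
  exact pv_row_eq n_alts.toNat j (by omega)
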